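-- pv_equiv track=rewrite | github.com/abhrac/A_Study_On_Binary_Image_Representations | source/complement_run_forest.py | complement_run_forest
-- ===== SOURCE A (Python) =====
-- def complement_run_forest(run_forest):
--     rf_dims, rf_cols = run_forest
--     rf_cols_prime = []
--     for col in rf_cols:
--         col_prime = []
--         num_runs, prev_end = len(col), 0
--         if (num_runs == 0):
--             rf_cols_prime.append([(0, rf_dims[0])])
--             continue
--         for (i, run) in enumerate(col):
--             start, end = run
--             if ((i == 0) and (start != 0)):
--                 col_prime.append((0, start))
--             else:
--                 col_prime.append((prev_end, start))
--             prev_end = end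
--         if (prev_end != rf_dims[0]):
--             col_prime.append((prev_end, rf_dims[0]))
--         rf_cols_prime.append(col_prime)
--     return (rf_dims, rf_cols_prime)
-- ===== SOURCE B (Python) =====
-- def complement_run_forest(run_forest):
--     rf_dims, rf_cols = run_forest
--     height = rf_dims[0]
--
--     def complement_col(col):
--         if not col:
--             return [(0, height)]
--         lefts = [0] + [end for (_, end) in col]
--         rights = [start for (start, _) in col] + [height]
--         gaps = list(zip(lefts, rights))
--         if lefts[-1] == height:
--             gaps.pop()
--         return gaps
--
--     return (rf_dims, [complement_col(col) for col in rf_cols])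
-- ===== Notes on version B (the rewrite author's own statement) =====
-- stated objective: simpler
-- what changed: Replaces the stateful per-run loop (running prev_end, enumerate with an i==0 special case, trailing append) by zipping two boundary lists ([0]+ends against starts+[height]) and popping the last gap when the final run reaches the column height.
import Mathlib
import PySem

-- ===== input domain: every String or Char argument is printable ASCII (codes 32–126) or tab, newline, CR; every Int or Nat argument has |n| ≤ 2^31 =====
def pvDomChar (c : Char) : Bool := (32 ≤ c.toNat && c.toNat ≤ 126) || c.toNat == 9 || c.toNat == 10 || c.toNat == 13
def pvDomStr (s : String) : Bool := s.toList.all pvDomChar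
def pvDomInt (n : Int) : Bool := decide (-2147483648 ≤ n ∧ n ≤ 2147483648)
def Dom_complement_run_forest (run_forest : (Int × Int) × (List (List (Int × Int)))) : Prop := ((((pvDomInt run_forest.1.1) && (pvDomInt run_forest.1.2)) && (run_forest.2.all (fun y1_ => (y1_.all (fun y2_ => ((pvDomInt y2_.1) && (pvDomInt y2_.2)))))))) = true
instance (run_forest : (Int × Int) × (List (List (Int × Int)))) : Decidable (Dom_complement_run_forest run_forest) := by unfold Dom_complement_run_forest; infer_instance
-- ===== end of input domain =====

-- B replaces A's stateful per-run loop (prev_end, i==0 special case, trailing append)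
-- by zipping boundary lists [0]+ends with starts+[height] and popping the final gap
-- when the last run reaches the height; objective: simpler. A is total; no Pre_.

-- ===== PORT A =====
-- inner 'for (i, run) in enumerate(col)' loop: carries i, prev_end and the acc list
def pvA_colLoop (col : List (Int × Int)) (i : Nat) (prevEnd : Int)
    (acc : List (Int × Int)) : List (Int × Int) × Int :=
  match col with
  | [] => (acc, prevEnd)
  | (start, e) :: rest =>
      let entry := if i = 0 ∧ start ≠ 0 then ((0 : Int), start) else (prevEnd, start)
      pvA_colLoop rest (i + 1) e (acc ++ [entry])

-- one iteration of the outer 'for col in rf_cols' loop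
def pvA_col (h : Int) (col : List (Int × Int)) : List (Int × Int) :=
  if col = [] then [(0, h)]
  else
    let r := pvA_colLoop col 0 0 []
    if r.2 ≠ h then r.1 ++ [(r.2, h)] else r.1

def complement_run_forest (run_forest : (Int × Int) × (List (List (Int × Int)))) : (Int × Int) × (List (List (Int × Int))) :=
  let rf_dims := run_forest.1
  let rf_cols := run_forest.2
  let rf_cols_prime := rf_cols.foldl (fun acc col => acc ++ [pvA_col rf_dims.1 col]) []
  (rf_dims, rf_cols_prime)

-- ===== PORT B =====
def pvB_col (h : Int) (col : List (Int × Int)) : List (Int × Int) :=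
  if col = [] then [(0, h)]
  else
    let lefts := (0 : Int) :: col.map Prod.snd
    let rights := col.map Prod.fst ++ [h]
    let gaps := lefts.zip rights
    -- lefts[-1]: lefts is nonempty by construction, so getLastD is exact
    if lefts.getLastD 0 = h then gaps.dropLast else gaps

def complement_run_forest_alt (run_forest : (Int × Int) × (List (List (Int × Int)))) : (Int × Int) × (List (List (Int × Int))) :=
  (run_forest.1, run_forest.2.map (pvB_col run_forest.1.1))

-- ===== PRECONDITION & SPEC =====
def Spec_complement_run_forest (run_forest : (Int × Int) × (List (List (Int × Int)))) (out : (Int × Int) × (List (List (Int × Int)))) : Prop := out = complement_run_forest_alt run_forest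
instance (run_forest : (Int × Int) × (List (List (Int × Int)))) (out : (Int × Int) × (List (List (Int × Int)))) : Decidable (Spec_complement_run_forest run_forest out) := by unfold Spec_complement_run_forest; infer_instance

-- ===== CLAIM (what is proved, stated in full; the proofs are below) =====
def Claim_equal_complement_run_forest : Prop := ∀ (run_forest : (Int × Int) × (List (List (Int × Int)))), Dom_complement_run_forest run_forest → Spec_complement_run_forest run_forest (complement_run_forest run_forest)

-- ===== LEMMAS AND PROOFS =====

lemma getD_getLast?_cons (l : List Int) (a d : Int) :
    (a :: l).getLast?.getD d = l.getLast?.getD a := by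
  induction l generalizing a d with
  | nil => simp
  | cons b l ih => rw [List.getLast?_cons_cons, ih, ih]

-- A's loop, once started (i ≠ 0), pairs each carried previous end with the next start
lemma pvA_colLoop_ne_zero (col : List (Int × Int)) (i : Nat) (prevEnd : Int)
    (acc : List (Int × Int)) (hi : i ≠ 0) :
    pvA_colLoop col i prevEnd acc =
      (acc ++ (prevEnd :: col.map Prod.snd).zip (col.map Prod.fst),
       (col.map Prod.snd).getLastD prevEnd) := by
  induction col generalizing i prevEnd acc with
  | nil => simp [pvA_colLoop]
  | cons p rest ih =>
      obtain ⟨s, e⟩ := p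
      simp only [pvA_colLoop, hi, false_and, if_false]
      rw [ih (i + 1) e (acc ++ [(prevEnd, s)]) (by omega)]
      simp [getD_getLast?_cons, List.getLast?_map]

lemma zip_cons_append_singleton (l2 : List Int) (l1 : List Int) (d x : Int)
    (h : l1.length = l2.length) :
    (d :: l1).zip (l2 ++ [x]) = (d :: l1).zip l2 ++ [(l1.getLastD d, x)] := by
  induction l2 generalizing l1 d with
  | nil =>
      match l1, h with
      | [], _ => simp
  | cons a l2' ih =>
      match l1, h with
      | b :: l1', h =>
          simp only [List.cons_append, List.zip_cons_cons, List.cons_append]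
          rw [ih l1' b (by simpa using h)]
          simp [getD_getLast?_cons]

lemma dropLast_cons_concat (a x : Int × Int) (l : List (Int × Int)) :
    (a :: (l ++ [x])).dropLast = a :: l := by
  rw [← List.cons_append, List.dropLast_concat]

lemma col_eq (h : Int) (col : List (Int × Int)) : pvA_col h col = pvB_col h col := by
  match col with
  | [] => simp [pvA_col, pvB_col]
  | (s, e) :: rest =>
      simp only [pvA_col, pvB_col, if_neg (List.cons_ne_nil _ _)]
      -- first iteration: both branches of the i = 0 test produce (0, s)
      have h0 : pvA_colLoop ((s, e) :: rest) 0 0 [] =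
          pvA_colLoop rest 1 e [((0 : Int), s)] := by
        by_cases hs : s ≠ 0 <;> simp [pvA_colLoop, hs]
      rw [h0, pvA_colLoop_ne_zero rest 1 e [((0 : Int), s)] (by omega)]
      have hlen : (rest.map Prod.snd).length = (rest.map Prod.fst).length := by simp
      have hz := zip_cons_append_singleton (rest.map Prod.fst) (rest.map Prod.snd) e h hlen
      simp only [List.map_cons, List.zip_cons_cons, List.cons_append, List.nil_append, hz,
        List.getLastD_cons]
      by_cases hpe : ((rest.map Prod.snd).getLastD e) = h
      · have hpe' : (Option.map Prod.snd rest.getLast?).getD e = h := by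
          simpa [List.getLastD_eq_getLast?, List.getLast?_map] using hpe
        simp [hpe', dropLast_cons_concat]
      · have hpe' : ¬ (Option.map Prod.snd rest.getLast?).getD e = h := by
          simpa [List.getLastD_eq_getLast?, List.getLast?_map] using hpe
        simp [hpe']

lemma foldl_append_map (f : List (Int × Int) → List (Int × Int))
    (l : List (List (Int × Int))) (acc : List (List (Int × Int))) :
    l.foldl (fun a c => a ++ [f c]) acc = acc ++ l.map f := by
  induction l generalizing acc with
  | nil => simp
  | cons c rest ih => simp [List.foldl_cons, ih]

-- ===== VERDICT (by name: the statement is the Claim_ definition above) =====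
theorem complement_run_forest_spec : Claim_equal_complement_run_forest := by
  intro rf _
  unfold Spec_complement_run_forest complement_run_forest complement_run_forest_alt
  simp only [foldl_append_map, List.nil_append]
  congr 1
  exact List.map_congr_left (fun c _ => col_eq rf.1.1 c)
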